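-- pv_equiv track=rewrite | github.com/SkaneTrails/meal-planner | api/services/store_order.py | apply_learned_order
-- ===== SOURCE A (Python) =====
-- def apply_learned_order(db_order: list[str], tick_sequence: list[str]) -> list[str]:
--     """Apply the promote-only reorder algorithm.
--
--     Processes consecutive pairs from the tick sequence right-to-left.
--     For each pair (earlier_ticked, later_ticked), if earlier_ticked appears
--     after later_ticked in the DB, it gets promoted (moved just before
--     later_ticked). Right-to-left processing ensures earlier constraints
--     aren't broken by later promotions.
--
--     New items (not in DB) are appended at the end in tick order.
--
--     Args:
--         db_order: Current item ordering from Firestore.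
--         tick_sequence: Items in the order they were ticked off (first = encountered first in store).
--
--     Returns:
--         Updated item ordering.
--     """
--     if len(tick_sequence) <= 1:
--         return list(db_order)
--
--     # Deduplicate tick sequence, preserving first occurrence order
--     seen: set[str] = set()
--     deduped: list[str] = []
--     for item in tick_sequence:
--         if item not in seen:
--             seen.add(item)
--             deduped.append(item)
--     tick_sequence = deduped
--
--     if len(tick_sequence) <= 1:
--         return list(db_order)
--
--     result = list(db_order)
--
--     # Separate known (in DB) and new (not in DB) items
--     db_set = set(result)
--     known_ticked = [item for item in tick_sequence if item in db_set]
--     new_items = [item for item in tick_sequence if item not in db_set]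
--
--     # Process consecutive pairs right-to-left
--     for i in range(len(known_ticked) - 2, -1, -1):
--         earlier = known_ticked[i]
--         later = known_ticked[i + 1]
--
--         earlier_pos = result.index(earlier)
--         later_pos = result.index(later)
--
--         if earlier_pos > later_pos:
--             result.pop(earlier_pos)
--             new_later_pos = result.index(later)
--             result.insert(new_later_pos, earlier)
--
--     result.extend(new_items)
--     return result
-- ===== SOURCE B (Python) =====
-- def apply_learned_order(db_order: list[str], tick_sequence: list[str]) -> list[str]:
--     """Promote-only reorder, computed in one right-to-left pass over the tick
--     sequence using first-occurrence DB indices, then a single rendering pass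
--     over the DB -- no repeated list.index/pop/insert scans.
--
--     Each known ticked item either stays an "anchor" (keeps its DB slot) or is
--     promoted into the cluster displayed just before the anchor of the next
--     ticked item; comparisons only ever need the original first-occurrence
--     index of the item versus the current anchor's index.
--     """
--     deduped = list(dict.fromkeys(tick_sequence))
--     if len(deduped) <= 1:
--         return list(db_order)
--
--     pos = {}  # first-occurrence index of each item in the DB
--     for i, x in enumerate(db_order):
--         if x not in pos:
--             pos[x] = i
--
--     known = [x for x in deduped if x in pos]
--     new_items = [x for x in deduped if x not in pos]
--
--     cluster = {}    # anchor slot -> promoted items shown just before it (tick order)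
--     promoted = set()  # DB slots whose item moved into a cluster
--     nxt = None      # anchor slot of the previously processed (righter) item
--     for x in reversed(known):
--         p = pos[x]
--         if nxt is not None and p > nxt:
--             promoted.add(p)
--             cluster[nxt] = [x] + cluster.get(nxt, [])
--         else:
--             nxt = p
--
--     out = []
--     for i, x in enumerate(db_order):
--         if i in promoted:
--             continue
--         out += cluster.get(i, []) + [x]
--     out.extend(new_items)
--     return out
-- ===== Notes on version B (the rewrite author's own statement) =====
-- stated objective: faster
-- what changed: Replaces the quadratic loop of repeated list.index/pop/insert mutations with a single right-to-left pass that classifies each ticked item as an anchor or a cluster member keyed by original first-occurrence DB indices, and one final rendering pass over the DB.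
import Mathlib
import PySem

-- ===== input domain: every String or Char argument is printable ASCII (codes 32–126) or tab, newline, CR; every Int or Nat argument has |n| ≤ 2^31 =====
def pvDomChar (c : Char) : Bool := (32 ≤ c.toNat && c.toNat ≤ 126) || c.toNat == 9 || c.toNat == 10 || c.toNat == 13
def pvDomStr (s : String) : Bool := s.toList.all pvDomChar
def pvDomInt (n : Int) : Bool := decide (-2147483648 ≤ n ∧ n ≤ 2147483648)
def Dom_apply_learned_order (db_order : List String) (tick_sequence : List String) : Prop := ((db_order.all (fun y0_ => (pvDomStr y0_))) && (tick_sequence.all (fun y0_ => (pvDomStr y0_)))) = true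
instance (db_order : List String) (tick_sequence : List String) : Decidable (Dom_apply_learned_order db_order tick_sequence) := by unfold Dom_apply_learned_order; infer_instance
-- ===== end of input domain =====

-- B replaces A's quadratic index/pop/insert loop by one right-to-left anchor/cluster
-- classification pass over first-occurrence DB indices plus one rendering pass (faster per
-- a timing run's measurement; equivalence proved for the return value on all inputs).

-- ===== PORT A =====
-- A-side helper: the body of A's 'for i in range(len(known_ticked) - 2, -1, -1)' loop.
def pvABody (known : List String) (res : List String) (i : Int) : List String :=
  match PySem.List.pyGet? known i, PySem.List.pyGet? known (i + 1) with
  | some earlier, some later =>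
    match PySem.List.index? res earlier, PySem.List.index? res later with
    | some earlier_pos, some later_pos =>
      if later_pos < earlier_pos then
        match PySem.List.pop? res (earlier_pos : Int) with
        | some pr =>
          match PySem.List.index? pr.2 later with
          | some new_later_pos => PySem.List.insert pr.2 (new_later_pos : Int) earlier
          | none => pr.2        -- unreachable: later is still present after popping earlier
        | none => res            -- unreachable: earlier_pos is a valid index
      else res
    | _, _ => res                -- unreachable: earlier/later are elements of res
  | _, _ => res                  -- unreachable: i, i+1 are valid indices into known

def apply_learned_order (db_order : List String) (tick_sequence : List String) : List String :=
  if tick_sequence.length ≤ 1 then db_order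
  else
    -- deduplicate tick sequence, preserving first-occurrence order
    let deduped := (tick_sequence.foldl
      (fun (st : PySem.Set String × List String) item =>
        if st.1.contains item then st else (PySem.Set.add st.1 item, st.2 ++ [item]))
      (PySem.Set.empty, [])).2
    if deduped.length ≤ 1 then db_order
    else
      let result := db_order
      let db_set := PySem.Set.ofList result
      let known_ticked := deduped.filter (fun item => db_set.contains item)
      let new_items := deduped.filter (fun item => !db_set.contains item)
      let result := (PySem.List.pyRange ((known_ticked.length : Int) - 2) (-1) (-1)).foldl
        (pvABody known_ticked) result
      result ++ new_items

-- ===== PORT B =====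
-- B-side helper: body of B's right-to-left anchor/cluster pass ('for x in reversed(known)').
def pvBBody (pos : PySem.Dict String Int)
    (st : Option Int × PySem.Dict Int (List String) × PySem.Set Int) (x : String) :
    Option Int × PySem.Dict Int (List String) × PySem.Set Int :=
  let p := (pos.get? x).getD 0   -- pos[x]; x ∈ known so the key is present, default unreachable
  match st.1 with
  | some nxt =>
    if nxt < p then
      (some nxt, st.2.1.insert nxt (x :: st.2.1.getD nxt []), PySem.Set.add st.2.2 p)
    else (some p, st.2.1, st.2.2)
  | none => (some p, st.2.1, st.2.2)

def apply_learned_order_alt (db_order : List String) (tick_sequence : List String) : List String :=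
  let deduped := PySem.List.dedup tick_sequence
  if deduped.length ≤ 1 then db_order
  else
    let pos := (PySem.List.enumerate db_order 0).foldl
      (fun (d : PySem.Dict String Int) p => if d.contains p.2 then d else d.insert p.2 p.1)
      PySem.Dict.empty
    let known := deduped.filter (fun x => pos.contains x)
    let new_items := deduped.filter (fun x => !pos.contains x)
    let st := known.reverse.foldl (pvBBody pos)
      (none, PySem.Dict.empty, PySem.Set.empty)
    let out := (PySem.List.enumerate db_order 0).foldl
      (fun out p =>
        if st.2.2.contains p.1 then out else out ++ st.2.1.getD p.1 [] ++ [p.2])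
      []
    out ++ new_items

-- ===== PRECONDITION & SPEC =====
def Spec_apply_learned_order (db_order : List String) (tick_sequence : List String) (out : List String) : Prop := out = apply_learned_order_alt db_order tick_sequence
instance (db_order : List String) (tick_sequence : List String) (out : List String) : Decidable (Spec_apply_learned_order db_order tick_sequence out) := by unfold Spec_apply_learned_order; infer_instance

-- ===== CLAIM (what is proved, stated in full; the proofs are below) =====
def Claim_equal_apply_learned_order : Prop := ∀ (db_order : List String) (tick_sequence : List String), Dom_apply_learned_order db_order tick_sequence → Spec_apply_learned_order db_order tick_sequence (apply_learned_order db_order tick_sequence)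

-- ===== LEMMAS AND PROOFS =====

-- first-occurrence index of x in db, as an Int
def pvFpos (db : List String) (x : String) : Int := (db.idxOf x : Int)

-- one rendered DB slot: nothing if the slot's item was promoted away, else the cluster
-- attached to the slot followed by the slot's item
def pvSeg (C : PySem.Dict Int (List String)) (P : PySem.Set Int) (j : Int) (s : String) : List String :=
  if P.contains j then [] else C.getD j [] ++ [s]

def pvRender (C : PySem.Dict Int (List String)) (P : PySem.Set Int) : Int → List String → List String
  | _, [] => []
  | j, s :: t => pvSeg C P j s ++ pvRender C P (j + 1) t

-- A's loop, structurally: walk the known-ticked items right-to-left carrying 'later'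
def pvAStep (res : List String) (earlier later : String) : List String :=
  match PySem.List.index? res earlier, PySem.List.index? res later with
  | some earlier_pos, some later_pos =>
    if later_pos < earlier_pos then
      match PySem.List.pop? res (earlier_pos : Int) with
      | some pr =>
        match PySem.List.index? pr.2 later with
        | some new_later_pos => PySem.List.insert pr.2 (new_later_pos : Int) earlier
        | none => pr.2
      | none => res
    else res
  | _, _ => res

def pvALoop : List String → String → List String → List String
  | res, _, [] => res
  | res, later, x :: xs => pvALoop (pvAStep res x later) x xs

-- B's loop, structurally
def pvBLoop (db : List String) :
    Int → PySem.Dict Int (List String) → PySem.Set Int → List String →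
    PySem.Dict Int (List String) × PySem.Set Int
  | _, C, P, [] => (C, P)
  | a, C, P, x :: xs =>
    if a < pvFpos db x then
      pvBLoop db a (C.insert a (x :: C.getD a [])) (PySem.Set.add P (pvFpos db x)) xs
    else pvBLoop db (pvFpos db x) C P xs

-- the loop invariant tying A's mutable list (always 'pvRender C P 0 db') to B's state
def pvINV (db : List String) (xs : List String) (later : String) (a : Int)
    (C : PySem.Dict Int (List String)) (P : PySem.Set Int) : Prop :=
  later ∈ db ∧ later ∉ xs ∧ xs.Nodup ∧ (∀ x ∈ xs, x ∈ db) ∧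
  -- cluster keys are first-occurrence slots of distinct already-processed anchors
  (∀ j l, C.get? j = some l → ∃ s, s ∈ db ∧ j = pvFpos db s ∧ s ∉ xs ∧ s ≠ later ∧
      (∀ j' l', C.get? j' = some l' → s ∉ l')) ∧
  -- cluster members are processed DB items whose first-occurrence slot is promoted
  (∀ j l, C.get? j = some l → ∀ y ∈ l, y ∈ db ∧ y ∉ xs ∧ pvFpos db y ∈ (P : List Int)) ∧
  -- promoted slots are exactly first-occurrence slots of cluster members
  (∀ p ∈ (P : List Int), ∃ j l y, C.get? j = some l ∧ y ∈ l ∧ p = pvFpos db y) ∧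
  -- the current 'later' sits at anchor slot a: unpromoted at its own slot, or at the
  -- front of the cluster of anchor slot a
  ((a = pvFpos db later ∧ C.get? a = none ∧ (∀ j l, C.get? j = some l → later ∉ l)) ∨
   (∃ tl, C.get? a = some (later :: tl) ∧ later ∉ tl ∧ a < pvFpos db later ∧
      (∀ j l, C.get? j = some l → j ≠ a → later ∉ l)))

theorem pvRender_append (C : PySem.Dict Int (List String)) (P : PySem.Set Int)
    (u v : List String) : ∀ s : Int,
    pvRender C P s (u ++ v) = pvRender C P s u ++ pvRender C P (s + u.length) v := by
  induction u with
  | nil => intro s; simp [pvRender]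
  | cons h t ih =>
    intro s
    simp only [List.cons_append, pvRender, ih (s + 1), List.append_assoc, List.length_cons]
    congr 3
    push_cast; ring
theorem pvRender_congr (C C' : PySem.Dict Int (List String)) (P P' : PySem.Set Int)
    (l : List String) : ∀ s : Int,
    (∀ j : Int, s ≤ j → j < s + l.length → P.contains j = P'.contains j ∧ C.getD j [] = C'.getD j []) →
    pvRender C P s l = pvRender C' P' s l := by
  induction l with
  | nil => intro s _; rfl
  | cons h t ih =>
    intro s hcong
    have h0 := hcong s le_rfl (by simp only [List.length_cons]; push_cast; omega)
    simp only [pvRender, pvSeg, h0.1, h0.2]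
    congr 1
    exact ih (s + 1) (fun j h1 h2 => hcong j (by omega) (by simp at h2 ⊢; omega))
theorem pvRender_mem (C : PySem.Dict Int (List String)) (P : PySem.Set Int)
    (l : List String) (y : String) : ∀ s : Int,
    y ∈ pvRender C P s l →
    (∃ (j : Int) (l' : List String), s ≤ j ∧ j < s + l.length ∧ C.get? j = some l' ∧ y ∈ l') ∨ y ∈ l := by
  induction l with
  | nil => intro s h; simp [pvRender] at h
  | cons h t ih =>
    intro s hy
    simp only [pvRender, List.mem_append] at hy
    rcases hy with hy | hy
    · simp only [pvSeg] at hy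
      split at hy
      · simp at hy
      · rcases List.mem_append.1 hy with hy | hy
        · left
          have hne : C.getD s [] ≠ [] := by intro h0; rw [h0] at hy; simp at hy
          rw [PySem.Dict.getD_eq_get?_getD] at hy hne
          cases hget : C.get? s with
          | none => rw [hget] at hne; simp at hne
          | some l' => rw [hget] at hy; exact ⟨s, l', le_rfl, by simp only [List.length_cons]; push_cast; omega, hget, hy⟩
        · right; simp at hy; simp [hy]
    · rcases ih (s + 1) hy with ⟨j, l', h1, h2, h3, h4⟩ | hy
      · left; exact ⟨j, l', by omega, by simp at h2 ⊢; omega, h3, h4⟩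
      · right; simp [hy]
theorem pvRender_empty (db : List String) : ∀ s : Int,
    pvRender PySem.Dict.empty PySem.Set.empty s db = db := by
  induction db with
  | nil => intro s; rfl
  | cons h t ih =>
    intro s
    simp only [pvRender, pvSeg, PySem.Dict.getD_empty]
    rw [show (PySem.Set.contains PySem.Set.empty s) = false from rfl]
    simpa using ih (s + 1)

theorem pv_not_mem_take_idxOf (l : List String) (x : String) : x ∉ l.take (l.idxOf x) := by
  induction l with
  | nil => simp
  | cons h t ih =>
    by_cases hx : h = x
    · subst hx; simp
    · rw [List.idxOf_cons_ne _ (by simpa using hx)]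
      simp [Ne.symm hx]
      exact fun hmem => absurd hmem ih

theorem pv_idxOf_inj (l : List String) (x y : String) (hx : x ∈ l) (hy : y ∈ l)
    (h : l.idxOf x = l.idxOf y) : x = y := by
  have h1 : l[l.idxOf x]'(List.idxOf_lt_length_of_mem hx) = x := List.getElem_idxOf _
  have h2 : l[l.idxOf y]'(List.idxOf_lt_length_of_mem hy) = y := List.getElem_idxOf _
  rw [← h1, ← h2]; congr 1

theorem pv_eraseIdx_decomp (pre suf : List String) (v : String) :
    (pre ++ v :: suf).eraseIdx pre.length = pre ++ suf := by
  induction pre with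
  | nil => simp
  | cons h t ih => simpa using ih

theorem pv_index_decomp (pre suf : List String) (v : String) (h : v ∉ pre) :
    PySem.List.index? (pre ++ v :: suf) v = some pre.length :=
  (PySem.List.index?_eq_some_iff _ _ _).2 ⟨pre, suf, rfl, rfl, h⟩

theorem pv_pop_decomp (pre suf : List String) (v : String) :
    PySem.List.pop? (pre ++ v :: suf) ((pre.length : Nat) : Int) = some (v, pre ++ suf) := by
  rw [PySem.List.pop?_natCast _ _ (show pre.length < (pre ++ v :: suf).length by simp)]
  congr 1
  rw [pv_eraseIdx_decomp]
  congr 1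
  simp

theorem pv_insert_decomp (pre suf : List String) (v : String) :
    PySem.List.insert (pre ++ suf) ((pre.length : Nat) : Int) v = pre ++ v :: suf := by
  rw [PySem.List.insert_natCast _ _ _ (by simp)]
  rw [List.take_left, List.drop_left]

-- A's dedupe loop: the 'seen' set and the 'deduped' list are the same list
theorem pv_dedupe_aux (ticks : List String) : ∀ s : PySem.Set String,
    (ticks.foldl
      (fun (st : PySem.Set String × List String) item =>
        if st.1.contains item then st else (PySem.Set.add st.1 item, st.2 ++ [item]))
      (s, (s : List String))).2 = ticks.foldl PySem.Set.add s := by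
  induction ticks with
  | nil => intro s; rfl
  | cons h t ih =>
    intro s
    by_cases hc : h ∈ (s : List String)
    · have : PySem.Set.contains s h = true := (PySem.Set.contains_iff _ _).2 hc
      simp only [List.foldl_cons, this, if_true, PySem.Set.add_of_mem hc]
      exact ih s
    · have hcf : PySem.Set.contains s h = false := by
        rcases Bool.eq_false_or_eq_true (PySem.Set.contains s h) with h0 | h0
        · exact absurd ((PySem.Set.contains_iff _ _).1 h0) hc
        · exact h0
      simp only [List.foldl_cons, hcf]
      rw [show PySem.Set.add s h = s ++ [h] from PySem.Set.add_of_not_mem hc] at *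
      exact ih (s ++ [h])

theorem pv_dedupe_eq (ticks : List String) :
    (ticks.foldl
      (fun (st : PySem.Set String × List String) item =>
        if st.1.contains item then st else (PySem.Set.add st.1 item, st.2 ++ [item]))
      (PySem.Set.empty, [])).2 = PySem.List.dedup ticks := by
  rw [PySem.List.dedup_eq_ofList, PySem.Set.ofList_eq_foldl]
  exact pv_dedupe_aux ticks PySem.Set.empty

-- the first-occurrence-index dict built by B
theorem pv_pos_get (l : List String) : ∀ (s : Int) (d : PySem.Dict String Int) (x : String),
    ((PySem.List.enumerate l s).foldl
      (fun (d : PySem.Dict String Int) p => if d.contains p.2 then d else d.insert p.2 p.1) d).get? x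
    = match d.get? x with
      | some v => some v
      | none => if x ∈ l then some (s + l.idxOf x) else none := by
  induction l with
  | nil =>
    intro s d x
    simp only [PySem.List.enumerate_nil, List.foldl_nil, List.not_mem_nil, if_false]
    cases d.get? x <;> rfl
  | cons y t ih =>
    intro s d x
    rw [PySem.List.enumerate_cons]
    simp only [List.foldl_cons]
    by_cases hxy : x = y
    · subst hxy
      by_cases hc : d.contains x = true
      · have : ∃ v, d.get? x = some v := by
          cases hg : d.get? x with
          | none => rw [(PySem.Dict.get?_eq_none_iff_contains d x)] at hg; rw [hg] at hc; simp at hc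
          | some v => exact ⟨v, rfl⟩
        obtain ⟨v, hv⟩ := this
        simp only [hc, if_true, ih, hv]
      · have hd : d.get? x = none := (PySem.Dict.get?_eq_none_iff_contains d x).mpr (by simpa using hc)
        simp only [hc, ih, hd, List.mem_cons, true_or, if_true]
        simp
    · have hne : (if d.contains y then d else d.insert y s).get? x = d.get? x := by
        split
        · rfl
        · exact PySem.Dict.get?_insert_of_ne _ _ hxy
      rw [ih, hne]
      cases d.get? x with
      | some v => rfl
      | none =>
        simp only [List.mem_cons, hxy, false_or, List.idxOf_cons_ne _ (by simpa using Ne.symm hxy)]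
        split
        · congr 1; push_cast; ring
        · rfl

theorem pv_pos_get_mem (db : List String) (x : String) (hx : x ∈ db) :
    ((PySem.List.enumerate db 0).foldl
      (fun (d : PySem.Dict String Int) p => if d.contains p.2 then d else d.insert p.2 p.1)
      PySem.Dict.empty).get? x = some (pvFpos db x) := by
  rw [pv_pos_get]
  simp [PySem.Dict.get?_empty, hx, pvFpos]

theorem pv_pos_contains (db : List String) (x : String) :
    ((PySem.List.enumerate db 0).foldl
      (fun (d : PySem.Dict String Int) p => if d.contains p.2 then d else d.insert p.2 p.1)
      PySem.Dict.empty).contains x = true ↔ x ∈ db := by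
  constructor
  · intro h
    by_contra hx
    have h0 := pv_pos_get db 0 PySem.Dict.empty x
    simp [PySem.Dict.get?_empty, hx] at h0
    rw [PySem.Dict.get?_eq_none_iff_contains] at h0
    rw [h0] at h
    simp at h
  · intro hx
    have h0 := pv_pos_get_mem db x hx
    by_contra hc
    rw [(PySem.Dict.get?_eq_none_iff_contains _ _).mpr (by simpa using hc)] at h0
    simp at h0

theorem pv_abody_eq (known res : List String) (m : Nat) (hm : m + 1 < known.length) :
    pvABody known res (m : Int) = pvAStep res (known[m]'(by omega)) (known[m+1]'hm) := by
  unfold pvABody pvAStep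
  rw [PySem.List.pyGet?_ofNat known m (by omega)]
  rw [show ((m : Int) + 1) = ((m + 1 : Nat) : Int) by push_cast; ring]
  rw [PySem.List.pyGet?_ofNat known (m+1) hm]

theorem pv_foldA (known : List String) : ∀ (m : Nat) (hm : m < known.length) (res : List String),
    (PySem.List.pyRange ((m : Int) - 1) (-1) (-1)).foldl (pvABody known) res
      = pvALoop res (known[m]'hm) ((known.take m).reverse) := by
  intro m
  induction m with
  | zero =>
    intro _ res
    rw [PySem.List.pyRange_neg_one_eq_nil (by norm_num)]
    simp [pvALoop]
  | succ m ih =>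
    intro hm res
    rw [show ((m + 1 : Nat) : Int) - 1 = (m : Int) by omega]
    rw [PySem.List.pyRange_neg_one_cons (by omega)]
    rw [List.foldl_cons, pv_abody_eq known res m hm, ih (by omega)]
    have htake : (known.take (m+1)).reverse = known[m]'(by omega) :: (known.take m).reverse := by
      rw [List.take_add_one, List.getElem?_eq_getElem (by omega)]
      simp
    rw [htake, pvALoop]

theorem pv_foldB (db : List String) (pos : PySem.Dict String Int)
    (hpos : ∀ x, x ∈ db → pos.get? x = some (pvFpos db x)) :
    ∀ (l : List String), (∀ x ∈ l, x ∈ db) → ∀ (a : Int) C P,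
    (l.foldl (pvBBody pos) (some a, C, P)).2 = pvBLoop db a C P l := by
  intro l
  induction l with
  | nil => intro _ a C P; rfl
  | cons x xs ih =>
    intro hmem a C P
    rw [List.foldl_cons]
    have hx : pos.get? x = some (pvFpos db x) := hpos x (hmem x (by simp))
    unfold pvBBody
    rw [hx]
    simp only [Option.getD_some]
    by_cases hlt : a < pvFpos db x
    · rw [if_pos hlt]
      rw [pvBLoop, if_pos hlt]
      exact ih (fun y hy => hmem y (by simp [hy])) a _ _
    · rw [if_neg hlt]
      rw [pvBLoop, if_neg hlt]
      exact ih (fun y hy => hmem y (by simp [hy])) _ _ _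

theorem pv_out_fold (db : List String) (C : PySem.Dict Int (List String)) (P : PySem.Set Int) :
    ∀ (s : Int) (acc : List String),
    (PySem.List.enumerate db s).foldl
      (fun out p => if P.contains p.1 then out else out ++ C.getD p.1 [] ++ [p.2]) acc
    = acc ++ pvRender C P s db := by
  induction db with
  | nil => intro s acc; simp [pvRender, PySem.List.enumerate_nil]
  | cons h t ih =>
    intro s acc
    rw [PySem.List.enumerate_cons, List.foldl_cons]
    simp only [pvRender, pvSeg]
    by_cases hc : P.contains s = true
    · rw [if_pos hc, hc, if_pos rfl, ih]
      simp
    · rw [if_neg hc, eq_false_of_ne_true hc, if_neg (by simp), ih]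
      simp

theorem pv_contains_false {α : Type} [BEq α] [LawfulBEq α] (P : PySem.Set α) (j : α)
    (h : j ∉ (P : List α)) : P.contains j = false := by
  rcases Bool.eq_false_or_eq_true (P.contains j) with h0 | h0
  · exact absurd ((PySem.Set.contains_iff _ _).1 h0) h
  · exact h0

theorem pv_getD_of_none (C : PySem.Dict Int (List String)) (j : Int) (h : C.get? j = none) :
    C.getD j [] = [] := by rw [PySem.Dict.getD_eq_get?_getD, h]; rfl

theorem pv_getD_of_some (C : PySem.Dict Int (List String)) (j : Int) (l : List String)
    (h : C.get? j = some l) : C.getD j [] = l := by rw [PySem.Dict.getD_eq_get?_getD, h]; rfl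

theorem pv_not_mem_render (C : PySem.Dict Int (List String)) (P : PySem.Set Int)
    (y : String) (t : List String) (s : Int)
    (h1 : ∀ j l, C.get? j = some l → y ∉ l) (h2 : y ∉ t) : y ∉ pvRender C P s t := by
  intro hmem
  rcases pvRender_mem C P t y s hmem with ⟨j, l', _, _, hget, hyl⟩ | hy
  · exact h1 j l' hget hyl
  · exact h2 hy

theorem pv_split_at (db : List String) (k : Nat) (hk : k < db.length) :
    db = db.take k ++ db[k] :: db.drop (k + 1) := by
  conv_lhs => rw [← List.take_append_drop k db]
  congr 1
  exact (List.drop_eq_getElem_cons hk).symm ▸ rfl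

theorem pv_render_one_split (C : PySem.Dict Int (List String)) (P : PySem.Set Int)
    (db : List String) (k : Nat) (hk : k < db.length) :
    pvRender C P 0 db = pvRender C P 0 (db.take k) ++ pvSeg C P (k : Int) (db[k]) ++
      pvRender C P ((k : Int) + 1) (db.drop (k + 1)) := by
  conv_lhs => rw [pv_split_at db k hk]
  rw [pvRender_append]
  simp only [List.length_take, min_eq_left hk.le, pvRender, zero_add, List.append_assoc]

theorem pv_render_take_split (C : PySem.Dict Int (List String)) (P : PySem.Set Int)
    (db : List String) (k1 k2 : Nat) (hk : k1 ≤ k2) (hk2 : k2 ≤ db.length) :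
    pvRender C P 0 (db.take k2) = pvRender C P 0 (db.take k1) ++
      pvRender C P (k1 : Int) ((db.take k2).drop k1) := by
  conv_lhs => rw [← List.take_append_drop k1 (db.take k2)]
  rw [pvRender_append, List.take_take, min_eq_left hk]
  congr 2
  simp
  omega

theorem pv_render_two_split (C : PySem.Dict Int (List String)) (P : PySem.Set Int)
    (db : List String) (k1 k2 : Nat) (hk : k1 < k2) (hk2 : k2 < db.length) :
    pvRender C P 0 db =
      pvRender C P 0 (db.take k1) ++ pvSeg C P (k1 : Int) (db[k1]'(lt_trans hk hk2)) ++
      pvRender C P ((k1 : Int) + 1) ((db.take k2).drop (k1 + 1)) ++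
      pvSeg C P (k2 : Int) (db[k2]) ++ pvRender C P ((k2 : Int) + 1) (db.drop (k2 + 1)) := by
  rw [pv_render_one_split C P db k2 hk2]
  have hlen : k1 < (db.take k2).length := by simp; omega
  conv_lhs => rw [pv_split_at (db.take k2) k1 hlen]
  rw [pvRender_append]
  simp only [List.length_take, List.take_take, min_eq_left hk.le, pvRender, zero_add,
    List.append_assoc, List.getElem_take,
    min_eq_left (show k1 ≤ db.length by omega)]

theorem pv_fposI_inj (db : List String) {x y : String} (hx : x ∈ db) (hy : y ∈ db)
    (h : pvFpos db x = pvFpos db y) : x = y :=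
  pv_idxOf_inj db x y hx hy (by unfold pvFpos at h; exact_mod_cast h)

-- freshness facts about the next unprocessed item x
theorem pv_fresh (db : List String) (x : String) (xs : List String) (later : String)
    (a : Int) (C : PySem.Dict Int (List String)) (P : PySem.Set Int)
    (h : pvINV db (x :: xs) later a C P) :
    (∀ j l, C.get? j = some l → x ∉ l) ∧ pvFpos db x ∉ (P : List Int) ∧
      C.get? (pvFpos db x) = none := by
  obtain ⟨hldb, hlxs, hnd, hxsdb, hkeys, hvals, hP, hanchor⟩ := h
  have hxdb : x ∈ db := hxsdb x (List.mem_cons_self)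
  have hxcl : ∀ j l, C.get? j = some l → x ∉ l := by
    intro j l hj hm
    exact (hvals j l hj x hm).2.1 (List.mem_cons_self)
  refine ⟨hxcl, ?_, ?_⟩
  · intro hmem
    obtain ⟨j, l, y, hj, hyl, hpy⟩ := hP _ hmem
    have hydb := (hvals j l hj y hyl).1
    have hxy : x = y := pv_fposI_inj db hxdb hydb hpy
    exact hxcl j l hj (hxy ▸ hyl)
  · cases hk : C.get? (pvFpos db x) with
    | none => rfl
    | some l =>
      obtain ⟨s, hsdb, hjs, hsxs, _, _⟩ := hkeys _ _ hk
      have : x = s := pv_fposI_inj db hxdb hsdb hjs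
      exact absurd (this ▸ List.mem_cons_self) hsxs

theorem pv_anchor_notP (db : List String) (x : String) (xs : List String) (later : String)
    (a : Int) (C : PySem.Dict Int (List String)) (P : PySem.Set Int)
    (h : pvINV db (x :: xs) later a C P) : a ∉ (P : List Int) := by
  obtain ⟨hldb, hlxs, hnd, hxsdb, hkeys, hvals, hP, hanchor⟩ := h
  intro hmem
  obtain ⟨j, l, y, hj, hyl, hpy⟩ := hP _ hmem
  have hydb := (hvals j l hj y hyl).1
  rcases hanchor with ⟨haeq, _, huni⟩ | ⟨tl, hasome, _, _, _⟩
  · have : later = y := pv_fposI_inj db hldb hydb (haeq ▸ hpy)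
    exact huni j l hj (this ▸ hyl)
  · obtain ⟨s, hsdb, hjs, _, _, hsnl⟩ := hkeys _ _ hasome
    have : s = y := pv_fposI_inj db hsdb hydb (hjs ▸ hpy)
    exact hsnl j l hj (this ▸ hyl)

theorem pv_inv_move (db : List String) (x : String) (xs : List String) (later : String)
    (a : Int) (C : PySem.Dict Int (List String)) (P : PySem.Set Int)
    (h : pvINV db (x :: xs) later a C P) (hlt : a < pvFpos db x) :
    pvINV db xs x a (C.insert a (x :: C.getD a []))
      (PySem.Set.add P (pvFpos db x)) := by
  obtain ⟨hxcl, hxP, hxK⟩ := pv_fresh db x xs later a C P h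
  obtain ⟨hldb, hlxs, hnd, hxsdb, hkeys, hvals, hP, hanchor⟩ := h
  have hxdb : x ∈ db := hxsdb x (List.mem_cons_self)
  have hCa : C.getD a [] = [] ∨ ∃ la, C.get? a = some la ∧ C.getD a [] = la := by
    cases hk : C.get? a with
    | none => exact Or.inl (pv_getD_of_none C a hk)
    | some la => exact Or.inr ⟨la, rfl, pv_getD_of_some C a la hk⟩
  have hxCa : x ∉ C.getD a [] := by
    rcases hCa with h0 | ⟨la, hla, h0⟩
    · simp [h0]
    · rw [h0]; exact hxcl a la hla
  refine ⟨hxdb, (List.nodup_cons.1 hnd).1, (List.nodup_cons.1 hnd).2,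
    fun y hy => hxsdb y (List.mem_cons_of_mem _ hy), ?_, ?_, ?_, ?_⟩
  · -- keys
    intro j l hj
    by_cases hja : j = a
    · subst j
      rcases hanchor with ⟨haeq, hanone, huni⟩ | ⟨tl, hasome, hltl, haLT, huni⟩
      · refine ⟨later, hldb, haeq, fun hm => hlxs (List.mem_cons_of_mem _ hm),
          fun he => hlxs (he ▸ List.mem_cons_self), ?_⟩
        intro j' l' hj'
        by_cases hj'a : j' = a
        · subst j'
          rw [PySem.Dict.get?_insert_self] at hj'
          cases hj'
          rw [pv_getD_of_none C _ hanone]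
          simp
          exact fun he => hlxs (he ▸ List.mem_cons_self)
        · rw [PySem.Dict.get?_insert_of_ne _ _ hj'a] at hj'
          exact huni j' l' hj'
      · obtain ⟨s, hsdb, hjs, hsxs, hsnl, hsnotin⟩ := hkeys _ _ hasome
        refine ⟨s, hsdb, hjs, fun hm => hsxs (List.mem_cons_of_mem _ hm),
          fun he => hsxs (he ▸ List.mem_cons_self), ?_⟩
        intro j' l' hj'
        by_cases hj'a : j' = a
        · subst j'
          rw [PySem.Dict.get?_insert_self] at hj'
          cases hj'
          rw [pv_getD_of_some C _ _ hasome]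
          simp
          have hs := hsnotin a _ hasome
          simp at hs
          exact ⟨fun he => hsxs (he ▸ List.mem_cons_self), hs.1, hs.2⟩
        · rw [PySem.Dict.get?_insert_of_ne _ _ hj'a] at hj'
          exact hsnotin j' l' hj'
    · rw [PySem.Dict.get?_insert_of_ne _ _ hja] at hj
      obtain ⟨s, hsdb, hjs, hsxs, hsnl, hsnotin⟩ := hkeys _ _ hj
      refine ⟨s, hsdb, hjs, fun hm => hsxs (List.mem_cons_of_mem _ hm),
        fun he => hsxs (he ▸ List.mem_cons_self), ?_⟩
      intro j' l' hj'
      by_cases hj'a : j' = a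
      · subst j'
        rw [PySem.Dict.get?_insert_self] at hj'
        cases hj'
        simp
        refine ⟨fun he => hsxs (he ▸ List.mem_cons_self), ?_⟩
        rcases hCa with h0 | ⟨la, hla, h0⟩
        · simp [h0]
        · rw [h0]; exact hsnotin a la hla
      · rw [PySem.Dict.get?_insert_of_ne _ _ hj'a] at hj'
        exact hsnotin j' l' hj'
  · -- vals
    intro j l hj y hy
    by_cases hja : j = a
    · subst j
      rw [PySem.Dict.get?_insert_self] at hj
      cases hj
      rcases List.mem_cons.1 hy with hyx | hyCa
      · subst hyx
        exact ⟨hxdb, (List.nodup_cons.1 hnd).1, (PySem.Set.mem_add _ _ _).2 (Or.inr rfl)⟩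
      · rcases hCa with h0 | ⟨la, hla, h0⟩
        · rw [h0] at hyCa; simp at hyCa
        · rw [h0] at hyCa
          obtain ⟨hydb, hyxs, hyP⟩ := hvals a la hla y hyCa
          exact ⟨hydb, fun hm => hyxs (List.mem_cons_of_mem _ hm),
            (PySem.Set.mem_add _ _ _).2 (Or.inl hyP)⟩
    · rw [PySem.Dict.get?_insert_of_ne _ _ hja] at hj
      obtain ⟨hydb, hyxs, hyP⟩ := hvals j l hj y hy
      exact ⟨hydb, fun hm => hyxs (List.mem_cons_of_mem _ hm),
        (PySem.Set.mem_add _ _ _).2 (Or.inl hyP)⟩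
  · -- P
    intro p hp
    rcases (PySem.Set.mem_add _ _ _).1 hp with hpP | hpx
    · obtain ⟨j, l, y, hj, hyl, hpy⟩ := hP _ hpP
      by_cases hja : j = a
      · subst j
        refine ⟨a, x :: C.getD a [], y, PySem.Dict.get?_insert_self _ _ _, ?_, hpy⟩
        rw [pv_getD_of_some C _ _ hj]
        exact List.mem_cons_of_mem _ hyl
      · exact ⟨j, l, y, by rw [PySem.Dict.get?_insert_of_ne _ _ hja]; exact hj, hyl, hpy⟩
    · exact ⟨a, x :: C.getD a [], x, PySem.Dict.get?_insert_self _ _ _,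
        List.mem_cons_self, hpx⟩
  · -- anchor: x is now promoted at the front of the cluster of a
    refine Or.inr ⟨C.getD a [], PySem.Dict.get?_insert_self _ _ _, hxCa, hlt, ?_⟩
    intro j l hj hja
    rw [PySem.Dict.get?_insert_of_ne _ _ hja] at hj
    exact hxcl j l hj

theorem pv_inv_stay (db : List String) (x : String) (xs : List String) (later : String)
    (a : Int) (C : PySem.Dict Int (List String)) (P : PySem.Set Int)
    (h : pvINV db (x :: xs) later a C P) :
    pvINV db xs x (pvFpos db x) C P := by
  obtain ⟨hxcl, hxP, hxK⟩ := pv_fresh db x xs later a C P h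
  obtain ⟨hldb, hlxs, hnd, hxsdb, hkeys, hvals, hP, hanchor⟩ := h
  have hxdb : x ∈ db := hxsdb x (List.mem_cons_self)
  refine ⟨hxdb, (List.nodup_cons.1 hnd).1, (List.nodup_cons.1 hnd).2,
    fun y hy => hxsdb y (List.mem_cons_of_mem _ hy), ?_, ?_, hP, ?_⟩
  · intro j l hj
    obtain ⟨s, hsdb, hjs, hsxs, hsnl, hsnotin⟩ := hkeys _ _ hj
    exact ⟨s, hsdb, hjs, fun hm => hsxs (List.mem_cons_of_mem _ hm),
      fun he => hsxs (he ▸ List.mem_cons_self), hsnotin⟩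
  · intro j l hj y hy
    obtain ⟨hydb, hyxs, hyP⟩ := hvals j l hj y hy
    exact ⟨hydb, fun hm => hyxs (List.mem_cons_of_mem _ hm), hyP⟩
  · exact Or.inl ⟨rfl, hxK, fun j l hj => hxcl j l hj⟩

theorem pv_anchor_data (db : List String) (x : String) (xs : List String) (later : String)
    (a : Int) (C : PySem.Dict Int (List String)) (P : PySem.Set Int)
    (h : pvINV db (x :: xs) later a C P) :
    ∃ (aN : Nat) (haNlt : aN < db.length) (rest : List String),
      a = (aN : Int) ∧ aN ≤ db.idxOf later ∧
      pvSeg C P a (db[aN]'haNlt) = later :: rest ∧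
      x ∉ pvSeg C P a (db[aN]'haNlt) ∧
      (∀ j l, C.get? j = some l → j ≠ a → later ∉ l) := by
  obtain ⟨hxcl, hxP, hxK⟩ := pv_fresh db x xs later a C P h
  have haP := pv_anchor_notP db x xs later a C P h
  obtain ⟨hldb, hlxs, hnd, hxsdb, hkeys, hvals, hP, hanchor⟩ := h
  have hcf : P.contains a = false := pv_contains_false P a haP
  rcases hanchor with ⟨haeq, hanone, huni⟩ | ⟨tl, hasome, hltl, haLT, huni⟩
  · -- later unpromoted, sitting at its own slot
    have hlt : db.idxOf later < db.length := List.idxOf_lt_length_of_mem hldb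
    refine ⟨db.idxOf later, hlt, [], by exact_mod_cast haeq, le_rfl, ?_, ?_, ?_⟩
    · simp only [pvSeg, hcf, Bool.false_eq_true, if_false, pv_getD_of_none C a hanone,
        List.nil_append, List.getElem_idxOf]
    · simp only [pvSeg, hcf, Bool.false_eq_true, if_false, pv_getD_of_none C a hanone,
        List.nil_append, List.getElem_idxOf]
      simp
      exact fun he => hlxs (he ▸ List.mem_cons_self)
    · exact fun j l hj _ => huni j l hj
  · -- later promoted: front of the cluster hanging off anchor slot a
    obtain ⟨s, hsdb, hjs, hsxs, hsnl, hsnotin⟩ := hkeys _ _ hasome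
    have hslt : db.idxOf s < db.length := List.idxOf_lt_length_of_mem hsdb
    have haNle : db.idxOf s ≤ db.idxOf later := by
      have := haLT
      rw [hjs] at this
      unfold pvFpos at this
      omega
    refine ⟨db.idxOf s, hslt, tl ++ [s], hjs ▸ rfl, haNle, ?_, ?_, huni⟩
    · simp only [pvSeg, hcf, Bool.false_eq_true, if_false, List.getElem_idxOf,
        pv_getD_of_some C a _ hasome]
      simp
    · simp only [pvSeg, hcf, Bool.false_eq_true, if_false, List.getElem_idxOf,
        pv_getD_of_some C a _ hasome]
      have hx1 : x ∉ later :: tl := hxcl a _ hasome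
      simp at hx1 ⊢
      exact ⟨hx1.1, hx1.2, fun he => hsxs (he ▸ List.mem_cons_self)⟩

theorem pv_later_not_mem (db : List String) (later : String) (_hldb : later ∈ db)
    (a : Int) (C : PySem.Dict Int (List String)) (P : PySem.Set Int) (aN : Nat)
    (haNa : a = (aN : Int)) (haNle : aN ≤ db.idxOf later)
    (huni : ∀ j l, C.get? j = some l → j ≠ a → later ∉ l) :
    later ∉ pvRender C P 0 (db.take aN) := by
  intro hmem
  rcases pvRender_mem C P (db.take aN) later 0 hmem with ⟨j, l', h0j, hjlt, hget, hyl⟩ | hml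
  · have hlen : (db.take aN).length ≤ aN := by simp
    have hja : j ≠ a := by rw [haNa]; omega
    exact huni j l' hget hja hyl
  · have h1 : db.take aN = (db.take (db.idxOf later)).take aN := by
      rw [List.take_take, min_eq_left haNle]
    rw [h1] at hml
    exact pv_not_mem_take_idxOf db later (List.mem_of_mem_take hml)

theorem pv_x_not_mem_take (db : List String) (x : String)
    (C : PySem.Dict Int (List String)) (P : PySem.Set Int)
    (hxcl : ∀ j l, C.get? j = some l → x ∉ l) (k : Nat) (hk : k ≤ db.idxOf x) :
    x ∉ pvRender C P 0 (db.take k) := by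
  apply pv_not_mem_render C P x _ _ hxcl
  intro hml
  have h1 : db.take k = (db.take (db.idxOf x)).take k := by
    rw [List.take_take, min_eq_left hk]
  rw [h1] at hml
  exact pv_not_mem_take_idxOf db x (List.mem_of_mem_take hml)

theorem pv_x_not_mem_mid (db : List String) (x : String)
    (C : PySem.Dict Int (List String)) (P : PySem.Set Int)
    (hxcl : ∀ j l, C.get? j = some l → x ∉ l) (k1 k2 : Nat) (hk : k2 ≤ db.idxOf x) (s : Int) :
    x ∉ pvRender C P s ((db.take k2).drop k1) := by
  apply pv_not_mem_render C P x _ _ hxcl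
  intro hml
  have h2 := List.mem_of_mem_drop hml
  have h1 : db.take k2 = (db.take (db.idxOf x)).take k2 := by
    rw [List.take_take, min_eq_left hk]
  rw [h1] at h2
  exact pv_not_mem_take_idxOf db x (List.mem_of_mem_take h2)

theorem pvAStep_no_move (res : List String) (x later : String) (ep lp : Nat)
    (h1 : PySem.List.index? res x = some ep) (h2 : PySem.List.index? res later = some lp)
    (hle : ¬ lp < ep) : pvAStep res x later = res := by
  unfold pvAStep
  rw [h1, h2]
  exact if_neg hle

theorem pvAStep_do_move (res : List String) (x later : String) (R1 mid suf : List String)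
    (hres : res = (R1 ++ later :: mid) ++ x :: suf)
    (hx : x ∉ R1 ++ later :: mid) (hl : later ∉ R1) :
    pvAStep res x later = R1 ++ x :: (later :: (mid ++ suf)) := by
  have h1 : PySem.List.index? res x = some (R1 ++ later :: mid).length := by
    rw [hres]; exact pv_index_decomp _ _ _ hx
  have h2 : PySem.List.index? res later = some R1.length := by
    rw [hres, show (R1 ++ later :: mid) ++ x :: suf = R1 ++ later :: (mid ++ x :: suf) by simp]
    exact pv_index_decomp _ _ _ hl
  have hpop : PySem.List.pop? res (((R1 ++ later :: mid).length : Nat) : Int)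
      = some (x, (R1 ++ later :: mid) ++ suf) := by
    rw [hres]; exact pv_pop_decomp _ _ _
  have h3 : PySem.List.index? ((R1 ++ later :: mid) ++ suf) later = some R1.length := by
    rw [show (R1 ++ later :: mid) ++ suf = R1 ++ later :: (mid ++ suf) by simp]
    exact pv_index_decomp _ _ _ hl
  have hins : PySem.List.insert ((R1 ++ later :: mid) ++ suf) ((R1.length : Nat) : Int) x
      = R1 ++ x :: (later :: (mid ++ suf)) := by
    rw [show (R1 ++ later :: mid) ++ suf = R1 ++ later :: (mid ++ suf) by simp]
    exact pv_insert_decomp _ _ _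
  unfold pvAStep
  rw [h1, h2]
  dsimp only
  rw [if_pos (by simp), hpop]
  dsimp only
  rw [h3]
  dsimp only
  rw [hins]

theorem pv_contains_add_ne (P : PySem.Set Int) (p j : Int) (hne : j ≠ p) :
    (PySem.Set.add P p).contains j = P.contains j := by
  rcases Bool.eq_false_or_eq_true (P.contains j) with h0 | h0
  · rw [h0]
    exact (PySem.Set.contains_iff _ _).2
      ((PySem.Set.mem_add _ _ _).2 (Or.inl ((PySem.Set.contains_iff _ _).1 h0)))
  · rw [h0]
    apply pv_contains_false
    intro hmem
    rcases (PySem.Set.mem_add _ _ _).1 hmem with hm | hm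
    · have h1 := (PySem.Set.contains_iff _ _).2 hm
      rw [h0] at h1
      exact Bool.false_ne_true h1
    · exact hne hm

theorem pv_render_insert_add_congr (C : PySem.Dict Int (List String)) (P : PySem.Set Int)
    (a p : Int) (v : List String) (l : List String) (s : Int)
    (hcond : ∀ j : Int, s ≤ j → j < s + l.length → j ≠ a ∧ j ≠ p) :
    pvRender (C.insert a v) (PySem.Set.add P p) s l = pvRender C P s l := by
  apply pvRender_congr
  intro j h1 h2
  obtain ⟨hja, hjp⟩ := hcond j h1 h2
  exact ⟨pv_contains_add_ne P p j hjp, by rw [PySem.Dict.getD_insert]; simp [hja]⟩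

theorem pv_step_move (db : List String) (x : String) (xs : List String) (later : String)
    (a : Int) (C : PySem.Dict Int (List String)) (P : PySem.Set Int)
    (h : pvINV db (x :: xs) later a C P) (hlt : a < pvFpos db x) :
    pvAStep (pvRender C P 0 db) x later =
      pvRender (C.insert a (x :: C.getD a [])) (PySem.Set.add P (pvFpos db x)) 0 db := by
  obtain ⟨aN, haNlt, rest, haNa, haNle, hseg, hxseg, huni'⟩ := pv_anchor_data db x xs later a C P h
  obtain ⟨hxcl, hxP, hxK⟩ := pv_fresh db x xs later a C P h
  have haP := pv_anchor_notP db x xs later a C P h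
  have hldb : later ∈ db := h.1
  have hxdb : x ∈ db := h.2.2.2.1 x List.mem_cons_self
  have hpxlt : db.idxOf x < db.length := List.idxOf_lt_length_of_mem hxdb
  have hfx : pvFpos db x = ((db.idxOf x : Nat) : Int) := rfl
  have hax : aN < db.idxOf x := by rw [haNa, hfx] at hlt; exact_mod_cast hlt
  have hdbpx : db[db.idxOf x]'hpxlt = x := List.getElem_idxOf _
  have hcfa : P.contains a = false := pv_contains_false P a haP
  have hcfx : P.contains ((db.idxOf x : Nat) : Int) = false := pv_contains_false P _ (hfx ▸ hxP)
  have hsegx : pvSeg C P ((db.idxOf x : Nat) : Int) (db[db.idxOf x]'hpxlt) = [x] := by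
    simp only [pvSeg, hcfx, Bool.false_eq_true, if_false, pv_getD_of_none C _ (hfx ▸ hxK),
      List.nil_append, hdbpx]
  have e1 := pv_render_two_split C P db aN (db.idxOf x) hax hpxlt
  rw [← haNa, hseg, hsegx] at e1
  have hlR1 : later ∉ pvRender C P 0 (db.take aN) :=
    pv_later_not_mem db later hldb a C P aN haNa haNle huni'
  have hxR1 : x ∉ pvRender C P 0 (db.take aN) :=
    pv_x_not_mem_take db x C P hxcl aN hax.le
  have hxrest : x ∉ later :: rest := hseg ▸ hxseg
  have hxR2 : x ∉ pvRender C P (a + 1) ((db.take (db.idxOf x)).drop (aN + 1)) := by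
    rw [haNa]
    exact pv_x_not_mem_mid db x C P hxcl (aN + 1) (db.idxOf x) le_rfl _
  have hmove := pvAStep_do_move (pvRender C P 0 db) x later
    (pvRender C P 0 (db.take aN))
    (rest ++ pvRender C P (a + 1) ((db.take (db.idxOf x)).drop (aN + 1)))
    (pvRender C P (((db.idxOf x : Nat) : Int) + 1) (db.drop (db.idxOf x + 1)))
    (by rw [e1]; simp [List.append_assoc])
    (by
      simp only [List.mem_append, List.mem_cons]
      rintro (h0 | h0 | h0 | h0)
      · exact hxR1 h0
      · exact hxrest (h0 ▸ List.mem_cons_self)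
      · exact hxrest (List.mem_cons_of_mem _ h0)
      · exact hxR2 h0)
    hlR1
  rw [hmove]
  -- right-hand side
  have hanepx : a ≠ ((db.idxOf x : Nat) : Int) := by
    rw [haNa]; intro h0; omega
  have e2 := pv_render_two_split (C.insert a (x :: C.getD a []))
    (PySem.Set.add P ((db.idxOf x : Nat) : Int)) db aN (db.idxOf x) hax hpxlt
  have hCaA : C.getD a [] ++ [db[aN]'haNlt] = later :: rest := by
    have h0 := hseg
    simp only [pvSeg, hcfa, Bool.false_eq_true, if_false] at h0
    exact h0
  have hsega' : pvSeg (C.insert a (x :: C.getD a []))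
      (PySem.Set.add P ((db.idxOf x : Nat) : Int)) ((aN : Int)) (db[aN]'haNlt)
      = x :: later :: rest := by
    simp only [pvSeg, ← haNa, pv_contains_add_ne P _ a hanepx, hcfa, Bool.false_eq_true,
      if_false, PySem.Dict.getD_insert_self]
    rw [List.cons_append, hCaA]
  have hsegx' : pvSeg (C.insert a (x :: C.getD a []))
      (PySem.Set.add P ((db.idxOf x : Nat) : Int)) ((db.idxOf x : Nat) : Int)
      (db[db.idxOf x]'hpxlt) = [] := by
    simp only [pvSeg]
    rw [if_pos ((PySem.Set.contains_iff _ _).2 ((PySem.Set.mem_add _ _ _).2 (Or.inr rfl)))]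
  have hR1' : pvRender (C.insert a (x :: C.getD a []))
      (PySem.Set.add P ((db.idxOf x : Nat) : Int)) 0 (db.take aN)
      = pvRender C P 0 (db.take aN) := by
    apply pv_render_insert_add_congr
    intro j h1 h2
    have hlen : (db.take aN).length ≤ aN := by simp
    refine ⟨by rw [haNa]; omega, by omega⟩
  have hR2' : pvRender (C.insert a (x :: C.getD a []))
      (PySem.Set.add P ((db.idxOf x : Nat) : Int)) ((aN : Int) + 1)
      ((db.take (db.idxOf x)).drop (aN + 1))
      = pvRender C P ((aN : Int) + 1) ((db.take (db.idxOf x)).drop (aN + 1)) := by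
    apply pv_render_insert_add_congr
    intro j h1 h2
    rw [List.length_drop, List.length_take, min_eq_left hpxlt.le] at h2
    refine ⟨by rw [haNa]; omega, by omega⟩
  have hR3' : pvRender (C.insert a (x :: C.getD a []))
      (PySem.Set.add P ((db.idxOf x : Nat) : Int)) (((db.idxOf x : Nat) : Int) + 1)
      (db.drop (db.idxOf x + 1))
      = pvRender C P (((db.idxOf x : Nat) : Int) + 1) (db.drop (db.idxOf x + 1)) := by
    apply pv_render_insert_add_congr
    intro j h1 h2
    refine ⟨by rw [haNa]; omega, by omega⟩
  rw [hfx, e2, hsega', hsegx', hR1', hR2', hR3', ← haNa]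
  simp [List.append_assoc]

theorem pv_step_stay (db : List String) (x : String) (xs : List String) (later : String)
    (a : Int) (C : PySem.Dict Int (List String)) (P : PySem.Set Int)
    (h : pvINV db (x :: xs) later a C P) (hge : ¬ a < pvFpos db x) :
    pvAStep (pvRender C P 0 db) x later = pvRender C P 0 db := by
  obtain ⟨aN, haNlt, rest, haNa, haNle, hseg, hxseg, huni'⟩ := pv_anchor_data db x xs later a C P h
  obtain ⟨hxcl, hxP, hxK⟩ := pv_fresh db x xs later a C P h
  have hldb : later ∈ db := h.1
  have hlx : later ∉ x :: xs := h.2.1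
  have hxdb : x ∈ db := h.2.2.2.1 x List.mem_cons_self
  have hpxlt : db.idxOf x < db.length := List.idxOf_lt_length_of_mem hxdb
  have hfx : pvFpos db x = ((db.idxOf x : Nat) : Int) := rfl
  have hdbpx : db[db.idxOf x]'hpxlt = x := List.getElem_idxOf _
  have hcfx : P.contains ((db.idxOf x : Nat) : Int) = false := pv_contains_false P _ (hfx ▸ hxP)
  -- the anchor slot is distinct from x's slot
  have hne : aN ≠ db.idxOf x := by
    intro h0
    subst h0
    have hs0 : pvSeg C P a (db[db.idxOf x]'haNlt) = [x] := by
      simp only [pvSeg, haNa, hcfx, Bool.false_eq_true, if_false]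
      rw [pv_getD_of_none C _ (hfx ▸ hxK)]
      rw [List.nil_append, hdbpx]
    rw [hs0] at hseg
    have hlx2 : later = x := by
      have h1 := hseg.symm
      rw [List.cons.injEq] at h1
      exact h1.1
    exact hlx (hlx2 ▸ List.mem_cons_self)
  have hax : db.idxOf x < aN := by
    rw [haNa, hfx] at hge
    have h0 : ¬ (aN : Int) < (db.idxOf x : Int) := by exact_mod_cast hge
    omega
  have hsegx : pvSeg C P ((db.idxOf x : Nat) : Int) (db[db.idxOf x]'hpxlt) = [x] := by
    simp only [pvSeg, hcfx, Bool.false_eq_true, if_false, pv_getD_of_none C _ (hfx ▸ hxK),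
      List.nil_append, hdbpx]
  have e1 := pv_render_two_split C P db (db.idxOf x) aN hax haNlt
  rw [← haNa, hseg, hsegx] at e1
  have hxA0 : x ∉ pvRender C P 0 (db.take (db.idxOf x)) :=
    pv_x_not_mem_take db x C P hxcl (db.idxOf x) le_rfl
  have h1 : PySem.List.index? (pvRender C P 0 db) x
      = some (pvRender C P 0 (db.take (db.idxOf x))).length := by
    rw [show pvRender C P 0 db = pvRender C P 0 (db.take (db.idxOf x)) ++ x ::
        (pvRender C P (((db.idxOf x : Nat) : Int) + 1) ((db.take aN).drop (db.idxOf x + 1)) ++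
          (later :: rest) ++ pvRender C P (a + 1) (db.drop (aN + 1))) by
      rw [e1]; simp [List.append_assoc]]
    exact pv_index_decomp _ _ _ hxA0
  have e2 := pv_render_one_split C P db aN haNlt
  rw [← haNa, hseg] at e2
  have hlB0 : later ∉ pvRender C P 0 (db.take aN) :=
    pv_later_not_mem db later hldb a C P aN haNa haNle huni'
  have h2 : PySem.List.index? (pvRender C P 0 db) later
      = some (pvRender C P 0 (db.take aN)).length := by
    rw [show pvRender C P 0 db = pvRender C P 0 (db.take aN) ++ later ::
        (rest ++ pvRender C P (a + 1) (db.drop (aN + 1))) by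
      rw [e2]; simp [List.append_assoc]]
    exact pv_index_decomp _ _ _ hlB0
  have hsplit := pv_render_take_split C P db (db.idxOf x) aN hax.le haNlt.le
  have hlen : (pvRender C P 0 (db.take (db.idxOf x))).length
      ≤ (pvRender C P 0 (db.take aN)).length := by
    rw [hsplit]; simp
  exact pvAStep_no_move _ _ _ _ _ h1 h2 (by omega)


theorem pv_main (db : List String) : ∀ (xs : List String) (later : String) (a : Int)
    (C : PySem.Dict Int (List String)) (P : PySem.Set Int), pvINV db xs later a C P →
    pvALoop (pvRender C P 0 db) later xs =
      pvRender (pvBLoop db a C P xs).1 (pvBLoop db a C P xs).2 0 db := by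
  intro xs
  induction xs with
  | nil => intro later a C P _; rfl
  | cons x xs ih =>
    intro later a C P h
    rw [pvALoop]
    by_cases hlt : a < pvFpos db x
    · rw [show pvBLoop db a C P (x :: xs)
          = pvBLoop db a (C.insert a (x :: C.getD a [])) (PySem.Set.add P (pvFpos db x)) xs from by
        rw [pvBLoop, if_pos hlt]]
      rw [pv_step_move db x xs later a C P h hlt]
      exact ih x a _ _ (pv_inv_move db x xs later a C P h hlt)
    · rw [show pvBLoop db a C P (x :: xs) = pvBLoop db (pvFpos db x) C P xs from by
        rw [pvBLoop, if_neg hlt]]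
      rw [pv_step_stay db x xs later a C P h hlt]
      exact ih x (pvFpos db x) C P (pv_inv_stay db x xs later a C P h)

theorem pv_final (db ticks : List String) :
    apply_learned_order db ticks = apply_learned_order_alt db ticks := by
  unfold apply_learned_order apply_learned_order_alt
  rw [pv_dedupe_eq]
  by_cases h1 : ticks.length ≤ 1
  · rw [if_pos h1]
    have hdd : (PySem.List.dedup ticks).length ≤ 1 := by
      rw [PySem.List.dedup_eq_ofList]
      exact le_trans (PySem.Set.length_ofList_le _) h1
    rw [if_pos hdd]
  · rw [if_neg h1]
    by_cases h2 : (PySem.List.dedup ticks).length ≤ 1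
    · rw [if_pos h2, if_pos h2]
    · rw [if_neg h2, if_neg h2]
      dsimp only
      have hcont : ∀ y : String, (PySem.Set.ofList db).contains y
          = ((PySem.List.enumerate db 0).foldl
              (fun (d : PySem.Dict String Int) p => if d.contains p.2 then d else d.insert p.2 p.1)
              PySem.Dict.empty).contains y := by
        intro y
        by_cases hy : y ∈ db
        · rw [(PySem.Set.contains_iff _ _).2 ((PySem.Set.mem_ofList _ _).2 hy),
            (pv_pos_contains db y).2 hy]
        · rw [pv_contains_false _ _ (fun hm => hy ((PySem.Set.mem_ofList _ _).1 hm))]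
          rcases Bool.eq_false_or_eq_true (((PySem.List.enumerate db 0).foldl
              (fun (d : PySem.Dict String Int) p => if d.contains p.2 then d else d.insert p.2 p.1)
              PySem.Dict.empty).contains y) with h0 | h0
          · exact absurd ((pv_pos_contains db y).1 h0) hy
          · rw [h0]
      have hfilter1 : (PySem.List.dedup ticks).filter
            (fun item => (PySem.Set.ofList db).contains item)
          = (PySem.List.dedup ticks).filter (fun xx =>
            ((PySem.List.enumerate db 0).foldl
              (fun (d : PySem.Dict String Int) p => if d.contains p.2 then d else d.insert p.2 p.1)
              PySem.Dict.empty).contains xx) :=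
        List.filter_congr (fun y _ => hcont y)
      have hfilter2 : (PySem.List.dedup ticks).filter
            (fun item => !(PySem.Set.ofList db).contains item)
          = (PySem.List.dedup ticks).filter (fun xx =>
            !((PySem.List.enumerate db 0).foldl
              (fun (d : PySem.Dict String Int) p => if d.contains p.2 then d else d.insert p.2 p.1)
              PySem.Dict.empty).contains xx) :=
        List.filter_congr (fun y _ => by rw [hcont y])
      rw [hfilter1, hfilter2]
      congr 1
      set pos := (PySem.List.enumerate db 0).foldl
        (fun (d : PySem.Dict String Int) p => if d.contains p.2 then d else d.insert p.2 p.1)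
        PySem.Dict.empty with hposdef
      set known := (PySem.List.dedup ticks).filter (fun xx => pos.contains xx) with hknowndef
      have hkdb : ∀ y ∈ known, y ∈ db := by
        intro y hy
        exact (pv_pos_contains db y).1 (List.of_mem_filter hy)
      have hknodup : known.Nodup := (PySem.List.nodup_dedup ticks).filter _
      by_cases hk : known = []
      · rw [hk]
        rw [show ((([] : List String).length : Int) - 2) = (-2 : Int) by simp]
        rw [PySem.List.pyRange_neg_one_eq_nil (by norm_num)]
        rw [List.foldl_nil, List.reverse_nil, List.foldl_nil]
        rw [pv_out_fold db PySem.Dict.empty PySem.Set.empty 0 []]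
        rw [pvRender_empty]
        simp
      · have hlen1 : 1 ≤ known.length := by
          cases hh : known with
          | nil => exact absurd hh hk
          | cons a b => simp
        have hz : known.getLast hk ∈ db := hkdb _ (List.getLast_mem hk)
        rw [show ((known.length : Int) - 2) = (((known.length - 1 : Nat) : Int) - 1) by
          push_cast [hlen1]; omega]
        rw [pv_foldA known (known.length - 1) (by omega) db]
        have hrev : known.reverse = known.getLast hk :: known.dropLast.reverse := by
          conv_lhs => rw [← List.dropLast_append_getLast hk]
          rw [List.reverse_append]
          simp
        rw [hrev, List.foldl_cons]
        have hb1 : pvBBody pos (none, PySem.Dict.empty, PySem.Set.empty) (known.getLast hk)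
            = (some (pvFpos db (known.getLast hk)), PySem.Dict.empty, PySem.Set.empty) := by
          unfold pvBBody
          rw [pv_pos_get_mem db _ hz]
          rfl
        rw [hb1]
        have hdlmem : ∀ y ∈ known.dropLast.reverse, y ∈ db := by
          intro y hy
          exact hkdb y (List.dropLast_subset _ (List.mem_reverse.1 hy))
        have hfold2 := pv_foldB db pos (fun y hy => pv_pos_get_mem db y hy)
          known.dropLast.reverse hdlmem (pvFpos db (known.getLast hk))
          PySem.Dict.empty PySem.Set.empty
        rw [hfold2]
        rw [pv_out_fold db _ _ 0 []]
        rw [List.nil_append]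
        have hgl : known[known.length - 1]'(by omega) = known.getLast hk :=
          (List.getLast_eq_getElem hk).symm
        have htake : known.take (known.length - 1) = known.dropLast :=
          (List.dropLast_eq_take).symm
        rw [hgl, htake]
        have hznotin : known.getLast hk ∉ known.dropLast.reverse := by
          rw [List.mem_reverse]
          intro hmem
          have h0 := hknodup
          rw [← List.dropLast_append_getLast hk, List.nodup_append] at h0
          exact h0.2.2 _ hmem _ (List.mem_singleton.2 rfl) rfl
        have hinv : pvINV db known.dropLast.reverse (known.getLast hk)
            (pvFpos db (known.getLast hk)) PySem.Dict.empty PySem.Set.empty := by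
          refine ⟨hz, hznotin, ?_, hdlmem, ?_, ?_, ?_, ?_⟩
          · have h0 := hknodup
            rw [← List.dropLast_append_getLast hk, List.nodup_append] at h0
            exact List.nodup_reverse.2 h0.1
          · intro j l hj
            rw [PySem.Dict.get?_empty] at hj
            exact absurd hj (by simp)
          · intro j l hj
            rw [PySem.Dict.get?_empty] at hj
            exact absurd hj (by simp)
          · intro p hp
            exact absurd hp (List.not_mem_nil)
          · exact Or.inl ⟨rfl, PySem.Dict.get?_empty _, fun j l hj => by
              rw [PySem.Dict.get?_empty] at hj
              exact absurd hj (by simp)⟩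
        have hmain := pv_main db known.dropLast.reverse (known.getLast hk)
          (pvFpos db (known.getLast hk)) PySem.Dict.empty PySem.Set.empty hinv
        rw [← hmain]
        congr 1
        exact (pvRender_empty db 0).symm

-- ===== VERDICT (by name: the statement is the Claim_ definition above) =====
theorem apply_learned_order_spec : Claim_equal_apply_learned_order := by
  intro db_order tick_sequence _
  unfold Spec_apply_learned_order
  exact pv_final db_order tick_sequence
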